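-- pv_equiv track=rewrite | github.com/SINHOLEE/Algorithm | 9월/서울2반9월4일이신호/danjo.py | IsItDanjo
-- ===== SOURCE A (Python) =====
-- def IsItDanjo(N):
--     while True:
--         if N < 10:
--             return True
--         a = N % 10
--         if a >= (N // 10) % 10:
--             N = N // 10
--         else:
--             return False
-- ===== SOURCE B (Python) =====
-- def IsItDanjo(N):
--     if N < 10:
--         return True
--     ds = []
--     while N > 0:
--         ds.append(N % 10)
--         N //= 10
--     ds.reverse()
--     return ds == sorted(ds)
-- ===== Notes on version B (the rewrite author's own statement) =====
-- stated objective: alternative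
-- what changed: A scans adjacent digit pairs arithmetically with early exit inside one while-loop; B first extracts the full digit list (least-significant first), reverses it, and tests whether it equals its sorted copy.
import Mathlib
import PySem

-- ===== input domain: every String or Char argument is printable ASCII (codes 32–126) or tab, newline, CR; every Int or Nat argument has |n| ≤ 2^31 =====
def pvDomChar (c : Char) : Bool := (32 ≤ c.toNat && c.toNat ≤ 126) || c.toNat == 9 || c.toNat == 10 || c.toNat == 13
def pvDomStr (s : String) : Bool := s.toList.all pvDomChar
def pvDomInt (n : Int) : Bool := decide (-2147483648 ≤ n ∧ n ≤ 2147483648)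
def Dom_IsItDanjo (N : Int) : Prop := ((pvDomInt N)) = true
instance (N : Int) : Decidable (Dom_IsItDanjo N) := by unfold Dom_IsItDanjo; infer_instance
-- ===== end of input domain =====

-- B extracts the full digit list and compares it with its sorted copy instead of
-- A's early-exit arithmetic scan of adjacent digit pairs; same value on every input.

-- ===== PORT A =====
def IsItDanjo (N : Int) : Bool :=
  if N < 10 then true
  else
    let a := PySem.Int.mod N 10
    if PySem.Int.mod (PySem.Int.floordiv N 10) 10 ≤ a then
      IsItDanjo (PySem.Int.floordiv N 10)
    else false
termination_by N.toNat
decreasing_by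
  all_goals simp only [PySem.Int.floordiv, Int.fdiv_eq_ediv]
  all_goals omega

-- ===== PORT B =====
-- while N > 0: ds.append(N % 10); N //= 10
def pyDigitsLoop (N : Int) (ds : List Int) : List Int :=
  if 0 < N then pyDigitsLoop (PySem.Int.floordiv N 10) (ds ++ [PySem.Int.mod N 10]) else ds
termination_by N.toNat
decreasing_by
  all_goals simp only [PySem.Int.floordiv, Int.fdiv_eq_ediv]
  all_goals omega

def IsItDanjo_alt (N : Int) : Bool :=
  if N < 10 then true
  else
    let ds := (pyDigitsLoop N []).reverse
    ds == PySem.List.sorted ds (fun x => x)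

-- ===== PRECONDITION & SPEC =====
def Spec_IsItDanjo (N : Int) (out : Bool) : Prop := out = IsItDanjo_alt N
instance (N : Int) (out : Bool) : Decidable (Spec_IsItDanjo N out) := by unfold Spec_IsItDanjo; infer_instance

-- ===== CLAIM (what is proved, stated in full; the proofs are below) =====
def Claim_equal_IsItDanjo : Prop := ∀ (N : Int), Dom_IsItDanjo N → Spec_IsItDanjo N (IsItDanjo N)

-- ===== LEMMAS AND PROOFS =====

theorem digitsLoop_acc (N : Int) (ds : List Int) :
    pyDigitsLoop N ds = ds ++ pyDigitsLoop N [] := by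
  conv_lhs => rw [pyDigitsLoop]
  conv_rhs => rw [pyDigitsLoop]
  by_cases h : 0 < N
  · simp only [h, if_true, List.nil_append]
    rw [digitsLoop_acc (PySem.Int.floordiv N 10) (ds ++ [PySem.Int.mod N 10]),
      digitsLoop_acc (PySem.Int.floordiv N 10) [PySem.Int.mod N 10]]
    simp
  · simp [h]
termination_by N.toNat
decreasing_by
  all_goals simp only [PySem.Int.floordiv, Int.fdiv_eq_ediv]
  all_goals omega

theorem digitsLoop_cons (N : Int) (h : 0 < N) :
    pyDigitsLoop N [] = PySem.Int.mod N 10 :: pyDigitsLoop (PySem.Int.floordiv N 10) [] := by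
  rw [pyDigitsLoop]
  simp only [h, if_true, List.nil_append]
  exact digitsLoop_acc _ _

theorem digitsLoop_nil (N : Int) (h : ¬ 0 < N) : pyDigitsLoop N [] = [] := by
  rw [pyDigitsLoop]; simp [h]

theorem fdiv_pos_of_ten_le (N : Int) (h : (10 : Int) ≤ N) : 0 < PySem.Int.floordiv N 10 := by
  simp only [PySem.Int.floordiv, Int.fdiv_eq_ediv]
  omega

theorem A_iff_chain (N : Int) :
    IsItDanjo N = true ↔ List.IsChain (fun a b => b ≤ a) (pyDigitsLoop N []) := by
  rw [IsItDanjo]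
  by_cases h : N < 10
  · simp only [h, if_true, true_iff]
    by_cases h0 : 0 < N
    · rw [digitsLoop_cons N h0, digitsLoop_nil]
      · simp
      · simp only [PySem.Int.floordiv, Int.fdiv_eq_ediv]
        omega
    · rw [digitsLoop_nil N h0]
      exact List.IsChain.nil
  · have h10 : (10 : Int) ≤ N := by omega
    have hq := fdiv_pos_of_ten_le N h10
    rw [digitsLoop_cons N (by omega), digitsLoop_cons _ hq]
    rw [List.isChain_cons_cons, ← digitsLoop_cons _ hq]
    have ih := A_iff_chain (PySem.Int.floordiv N 10)
    simp only [h, if_false]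
    split
    · rename_i hc
      simp only [ih]
      exact (and_iff_right hc).symm
    · rename_i hc
      simp only [Bool.false_eq_true, false_iff]
      intro ⟨h1, _⟩
      exact hc h1
termination_by N.toNat
decreasing_by
  all_goals simp only [PySem.Int.floordiv, Int.fdiv_eq_ediv]
  all_goals omega

theorem sorted_self_iff_chain (l : List Int) :
    l.reverse = PySem.List.sorted l.reverse (fun x => x) ↔
      List.IsChain (fun a b : Int => b ≤ a) l := by
  rw [← List.isChain_reverse, List.isChain_iff_pairwise]
  constructor
  · intro h
    have := PySem.List.sorted_pairwise l.reverse (fun x => x)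
    rw [← h] at this
    exact this
  · intro h
    exact (PySem.List.sorted_eq_self_of_pairwise l.reverse (fun x => x) h).symm

-- ===== VERDICT (by name: the statement is the Claim_ definition above) =====
theorem IsItDanjo_spec : Claim_equal_IsItDanjo := by
  intro N _
  unfold Spec_IsItDanjo IsItDanjo_alt
  by_cases h : N < 10
  · simp only [h, if_true]
    rw [IsItDanjo]
    simp [h]
  · simp only [h, if_false]
    rw [Bool.eq_iff_iff, beq_iff_eq, sorted_self_iff_chain]
    exact A_iff_chain N
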